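-- pv_equiv track=rewrite | github.com/bapatist/IrO2-Water | TRAIN_SET_OV/energy_hist_by_formation.py | conf_categories
-- ===== SOURCE A (Python) =====
-- def conf_categories(config_types):
--     n_mono, n_dim, n_wat, n_vac, n_surf = 5*[0]
--     for c_type in config_types:
--         if c_type == 'isolated_atom':
--             n_mono += 1
--         elif c_type == 'dimer':
--             n_dim +=1
--         elif c_type in ['water_MD_sample' , 'water_non_minima', 'water_minima']:
--             n_wat +=1
--         elif c_type[:4] in ['slab', 'bulk']:
--             n_vac +=1
--         elif c_type[:4] in ['surf']:
--             n_surf +=1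
--     return (n_mono, n_dim, n_wat, n_vac, n_surf)
-- ===== SOURCE B (Python) =====
-- def conf_categories(config_types):
--     n_mono = sum(1 for c in config_types if c == 'isolated_atom')
--     n_dim = sum(1 for c in config_types if c == 'dimer')
--     n_wat = sum(1 for c in config_types
--                 if c in ('water_MD_sample', 'water_non_minima', 'water_minima'))
--     n_vac = sum(1 for c in config_types if c[:4] in ('slab', 'bulk'))
--     n_surf = sum(1 for c in config_types if c[:4] == 'surf')
--     return (n_mono, n_dim, n_wat, n_vac, n_surf)
-- ===== Notes on version B (the rewrite author's own statement) =====
-- stated objective: alternative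
-- what changed: Replaces the single elif-cascade accumulator loop with five independent counting passes (one per category), relying on the categories being mutually exclusive.
import Mathlib
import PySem

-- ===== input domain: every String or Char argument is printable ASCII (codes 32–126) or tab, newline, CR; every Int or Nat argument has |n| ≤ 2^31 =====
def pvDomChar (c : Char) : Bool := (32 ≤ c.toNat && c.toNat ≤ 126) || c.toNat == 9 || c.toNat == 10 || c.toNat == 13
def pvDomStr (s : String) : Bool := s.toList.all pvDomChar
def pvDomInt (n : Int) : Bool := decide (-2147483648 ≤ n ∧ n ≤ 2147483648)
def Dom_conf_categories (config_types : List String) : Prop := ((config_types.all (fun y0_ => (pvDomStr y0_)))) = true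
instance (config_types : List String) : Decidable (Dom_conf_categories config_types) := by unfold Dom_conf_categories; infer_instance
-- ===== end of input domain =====

-- B replaces A's single elif-cascade loop by five independent counting passes; alternative decomposition, same cost.

-- ===== PORT A =====
-- one step of A's loop body: the elif cascade over the 5-counter state
def confStepA (st : Int × Int × Int × Int × Int) (c_type : String) : Int × Int × Int × Int × Int :=
  let (n_mono, n_dim, n_wat, n_vac, n_surf) := st
  if c_type == "isolated_atom" then (n_mono + 1, n_dim, n_wat, n_vac, n_surf)
  else if c_type == "dimer" then (n_mono, n_dim + 1, n_wat, n_vac, n_surf)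
  else if c_type == "water_MD_sample" || c_type == "water_non_minima" || c_type == "water_minima" then
    (n_mono, n_dim, n_wat + 1, n_vac, n_surf)
  else if PySem.Str.slice c_type none (some 4) == "slab" || PySem.Str.slice c_type none (some 4) == "bulk" then
    (n_mono, n_dim, n_wat, n_vac + 1, n_surf)
  else if PySem.Str.slice c_type none (some 4) == "surf" then
    (n_mono, n_dim, n_wat, n_vac, n_surf + 1)
  else (n_mono, n_dim, n_wat, n_vac, n_surf)

def conf_categories (config_types : List String) : Int × Int × Int × Int × Int :=
  config_types.foldl confStepA (0, 0, 0, 0, 0)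

-- ===== PORT B =====
def conf_categories_alt (config_types : List String) : Int × Int × Int × Int × Int :=
  let n_mono : Int := (config_types.countP (fun c => c == "isolated_atom") : Nat)
  let n_dim : Int := (config_types.countP (fun c => c == "dimer") : Nat)
  let n_wat : Int := (config_types.countP
    (fun c => c == "water_MD_sample" || c == "water_non_minima" || c == "water_minima") : Nat)
  let n_vac : Int := (config_types.countP
    (fun c => PySem.Str.slice c none (some 4) == "slab" || PySem.Str.slice c none (some 4) == "bulk") : Nat)
  let n_surf : Int := (config_types.countP (fun c => PySem.Str.slice c none (some 4) == "surf") : Nat)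
  (n_mono, n_dim, n_wat, n_vac, n_surf)

-- ===== PRECONDITION & SPEC =====
def Spec_conf_categories (config_types : List String) (out : Int × Int × Int × Int × Int) : Prop := out = conf_categories_alt config_types
instance (config_types : List String) (out : Int × Int × Int × Int × Int) : Decidable (Spec_conf_categories config_types out) := by unfold Spec_conf_categories; infer_instance

-- ===== CLAIM (what is proved, stated in full; the proofs are below) =====
def Claim_equal_conf_categories : Prop := ∀ (config_types : List String), Dom_conf_categories config_types → Spec_conf_categories config_types (conf_categories config_types)

-- ===== LEMMAS AND PROOFS =====

-- the step of A adds the indicator of each (mutually exclusive) category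
theorem confStepA_eq (st : Int × Int × Int × Int × Int) (c : String) :
    confStepA st c =
      (st.1 + (if c == "isolated_atom" then 1 else 0),
       st.2.1 + (if c == "dimer" then 1 else 0),
       st.2.2.1 + (if c == "water_MD_sample" || c == "water_non_minima" || c == "water_minima" then 1 else 0),
       st.2.2.2.1 + (if PySem.Str.slice c none (some 4) == "slab" || PySem.Str.slice c none (some 4) == "bulk" then 1 else 0),
       st.2.2.2.2 + (if PySem.Str.slice c none (some 4) == "surf" then 1 else 0)) := by
  obtain ⟨a, b, w, v, s⟩ := st
  by_cases h1 : c = "isolated_atom"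
  · subst h1; simp [confStepA]; decide
  · by_cases h2 : c = "dimer"
    · subst h2; simp [confStepA]; decide
    · by_cases h3 : c = "water_MD_sample" ∨ c = "water_non_minima" ∨ c = "water_minima"
      · rcases h3 with h | h | h <;> (subst h; simp [confStepA]; decide)
      · push Not at h3
        obtain ⟨h3a, h3b, h3c⟩ := h3
        by_cases h4 : PySem.Str.slice c none (some 4) = "slab" ∨ PySem.Str.slice c none (some 4) = "bulk"
        · have h5 : PySem.Str.slice c none (some 4) ≠ "surf" := by
            rcases h4 with h | h <;> simp [h]
          simp [confStepA, h1, h2, h3a, h3b, h3c, h4, h5]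
        · push Not at h4
          simp [confStepA, h1, h2, h3a, h3b, h3c, h4.1, h4.2]
          split_ifs <;> simp

-- the fold starting from an arbitrary accumulator is the accumulator plus the five counts
theorem foldl_confStepA (l : List String) (st : Int × Int × Int × Int × Int) :
    l.foldl confStepA st =
      (st.1 + (l.countP (fun c => c == "isolated_atom") : Nat),
       st.2.1 + (l.countP (fun c => c == "dimer") : Nat),
       st.2.2.1 + (l.countP (fun c => c == "water_MD_sample" || c == "water_non_minima" || c == "water_minima") : Nat),
       st.2.2.2.1 + (l.countP (fun c => PySem.Str.slice c none (some 4) == "slab" || PySem.Str.slice c none (some 4) == "bulk") : Nat),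
       st.2.2.2.2 + (l.countP (fun c => PySem.Str.slice c none (some 4) == "surf") : Nat)) := by
  induction l generalizing st with
  | nil => simp
  | cons c l ih =>
    obtain ⟨a, b, w, v, s⟩ := st
    simp only [List.foldl_cons, ih, confStepA_eq, List.countP_cons]
    refine Prod.ext ?_ (Prod.ext ?_ (Prod.ext ?_ (Prod.ext ?_ ?_))) <;>
      simp <;> split_ifs <;> omega

-- ===== VERDICT (by name: the statement is the Claim_ definition above) =====
theorem conf_categories_spec : Claim_equal_conf_categories := by
  intro l _
  show conf_categories l = conf_categories_alt l
  simp [conf_categories, conf_categories_alt, foldl_confStepA]
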